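-- pv_equiv track=rewrite | github.com/titiman1013/Algorithm | 20.03.19/stylish indent_3378.py | RCS
-- ===== SOURCE A (Python) =====
-- def RCS(af, indenp, p):
--     org = []
--     ab, cd, ef = af[0]
--     for R in range(1, 21):
--         for C in range(1, 21):
--             for S in range(1, 21):
--                 if p == 1:
--                     org.append((R, C, S))   # 모든 값이 후보가 됨
--                 elif R * ab + C * cd + S * ef == indenp[1]:
--                     org.append((R, C, S))
--     for i in range(2, p):
--         ab, cd, ef = af[i-1]
--         dest = []
--         for R, C, S in org:
--             if R * ab + C * cd + S * ef == indenp[i]: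
--                 dest.append((R, C, S))
--         org = dest
--
--     return org
-- ===== SOURCE B (Python) =====
-- def RCS(af, indenp, p):
--     # Collect all linear constraints once, then do a single pass over the
--     # 20x20x20 grid keeping the triples that satisfy every constraint.
--     if p == 1:
--         cons = []
--     else:
--         cons = [(af[0], indenp[1])] + [(af[i - 1], indenp[i]) for i in range(2, p)]
--     return [(R, C, S)
--             for R in range(1, 21)
--             for C in range(1, 21)
--             for S in range(1, 21)
--             if all(R * a + C * b + S * c == t for (a, b, c), t in cons)]
-- ===== Notes on version B (the rewrite author's own statement) =====
-- stated objective: simpler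
-- what changed: A filters the 8000-triple grid pass by pass (one full winnowing pass of the surviving list per constraint); B builds the constraint list once and keeps a triple in a single grid pass iff it satisfies all constraints.
-- outside the precondition, e.g. on RCS([(4, 2, 1), (1, 2, 4), (22, 22, 22)], [22, -1, 2], 4): A returns [], B raises IndexError
import Mathlib
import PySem

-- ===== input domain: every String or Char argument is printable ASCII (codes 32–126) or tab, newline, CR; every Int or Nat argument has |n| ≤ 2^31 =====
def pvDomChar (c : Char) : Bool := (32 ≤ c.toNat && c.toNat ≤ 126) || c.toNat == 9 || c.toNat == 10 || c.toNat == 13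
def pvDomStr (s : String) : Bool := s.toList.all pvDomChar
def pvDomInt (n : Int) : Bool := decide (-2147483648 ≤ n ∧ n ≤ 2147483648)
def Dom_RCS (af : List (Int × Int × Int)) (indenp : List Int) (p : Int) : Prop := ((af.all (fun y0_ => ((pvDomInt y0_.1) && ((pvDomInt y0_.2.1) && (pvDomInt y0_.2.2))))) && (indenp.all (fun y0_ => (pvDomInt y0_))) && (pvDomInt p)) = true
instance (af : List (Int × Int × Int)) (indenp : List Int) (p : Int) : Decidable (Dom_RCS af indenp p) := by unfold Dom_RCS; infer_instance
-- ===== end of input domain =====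

-- B replaces A's pass-by-pass winnowing of the candidate list with one constraint
-- list checked in a single pass over the grid (objective: simpler; same cost).

-- ===== PORT A =====
def RCS (af : List (Int × Int × Int)) (indenp : List Int) (p : Int) : List (Int × Int × Int) :=
  let a0 := (PySem.List.pyGet? af 0).getD (0, 0, 0)   -- af[0] (IndexError on empty af excluded by Pre_)
  let ab := a0.1
  let cd := a0.2.1
  let ef := a0.2.2
  let org : List (Int × Int × Int) :=
    (PySem.List.pyRange 1 21 1).foldl (fun org R =>
      (PySem.List.pyRange 1 21 1).foldl (fun org C =>
        (PySem.List.pyRange 1 21 1).foldl (fun org S =>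
          if p = 1 then org ++ [(R, C, S)]
          else if R * ab + C * cd + S * ef = (PySem.List.pyGet? indenp 1).getD 0 then org ++ [(R, C, S)]
          else org) org) org) []
  (PySem.List.pyRange 2 p 1).foldl (fun org i =>
    let a := (PySem.List.pyGet? af (i - 1)).getD (0, 0, 0)
    org.foldl (fun dest t =>
      if t.1 * a.1 + t.2.1 * a.2.1 + t.2.2 * a.2.2 = (PySem.List.pyGet? indenp i).getD 0
      then dest ++ [t] else dest) []) org

-- ===== PORT B =====
def RCS_alt (af : List (Int × Int × Int)) (indenp : List Int) (p : Int) : List (Int × Int × Int) :=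
  let cons : List ((Int × Int × Int) × Int) :=
    if p = 1 then []
    else [((PySem.List.pyGet? af 0).getD (0, 0, 0), (PySem.List.pyGet? indenp 1).getD 0)] ++
      (PySem.List.pyRange 2 p 1).map (fun i =>
        ((PySem.List.pyGet? af (i - 1)).getD (0, 0, 0), (PySem.List.pyGet? indenp i).getD 0))
  (PySem.List.pyRange 1 21 1).flatMap (fun R =>
    (PySem.List.pyRange 1 21 1).flatMap (fun C =>
      ((PySem.List.pyRange 1 21 1).map (fun S => (R, C, S))).filter (fun t =>
        cons.all (fun c =>
          decide (t.1 * c.1.1 + t.2.1 * c.1.2.1 + t.2.2 * c.1.2.2 = c.2)))))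

-- ===== PRECONDITION & SPEC =====
-- Pre_ excludes the inputs where Python A raises IndexError (empty af; indenp or af too
-- short for p), and the inputs with too-short lists where A happens to return [] only
-- because its candidate set emptied before the bad index was reached — B builds the
-- constraint list eagerly and itself raises IndexError there.
def Pre_RCS (af : List (Int × Int × Int)) (indenp : List Int) (p : Int) : Prop :=
  af ≠ [] ∧ (p ≠ 1 → 2 ≤ indenp.length ∧ p ≤ (indenp.length : Int) ∧ p - 1 ≤ (af.length : Int))
instance (af : List (Int × Int × Int)) (indenp : List Int) (p : Int) : Decidable (Pre_RCS af indenp p) := by unfold Pre_RCS; infer_instance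
def pvWitness_RCS : (List (Int × Int × Int)) × List Int × Int := ([(1, 1, 1)], [0, 3], 2)
def Spec_RCS (af : List (Int × Int × Int)) (indenp : List Int) (p : Int) (out : List (Int × Int × Int)) : Prop := out = RCS_alt af indenp p
instance (af : List (Int × Int × Int)) (indenp : List Int) (p : Int) (out : List (Int × Int × Int)) : Decidable (Spec_RCS af indenp p out) := by unfold Spec_RCS; infer_instance

-- ===== CLAIM (what is proved, stated in full; the proofs are below) =====
def Claim_equal_RCS : Prop := ∀ (af : List (Int × Int × Int)) (indenp : List Int) (p : Int), Dom_RCS af indenp p → Pre_RCS af indenp p → Spec_RCS af indenp p (RCS af indenp p)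

-- ===== LEMMAS AND PROOFS =====

-- winnowing a list by successive filters = one filter by the conjunction
theorem foldl_filter_eq_filter_all {α β : Type} (l : List β) (q : β → α → Bool) (b : List α) :
    l.foldl (fun org i => org.filter (q i)) b = b.filter (fun t => l.all (fun i => q i t)) := by
  induction l generalizing b with
  | nil => simp
  | cons i l ih =>
    simp only [List.foldl_cons, ih, List.filter_filter, List.all_cons]
    exact List.filter_congr (fun a _ => by rw [Bool.and_comm])

theorem filter_flatMap' {α β : Type} (l : List α) (f : α → List β) (q : β → Bool) :
    (l.flatMap f).filter q = l.flatMap (fun x => (f x).filter q) := by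
  induction l with
  | nil => rfl
  | cons x l ih => simp [List.flatMap_cons, List.filter_append, ih]

theorem RCS_eq_alt : ∀ (af : List (Int × Int × Int)) (indenp : List Int) (p : Int),
    RCS af indenp p = RCS_alt af indenp p := by
  intro af indenp p
  unfold RCS RCS_alt
  by_cases hp : p = 1
  · subst hp
    simp only [reduceIte, PySem.List.foldl_append_eq_flatMap, List.nil_append,
      PySem.List.pyRange_one_eq_nil (by norm_num : (1:Int) ≤ 2),
      List.foldl_nil, List.all_nil, List.filter_true, ← List.map_eq_flatMap]
  · simp only [if_neg hp, PySem.List.foldl_append_ite,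
      PySem.List.foldl_append_eq_flatMap, List.nil_append, List.map_id',
      foldl_filter_eq_filter_all, filter_flatMap', List.filter_map,
      List.filter_filter, List.singleton_append, List.all_cons, List.all_map]
    congr 1
    funext R
    congr 1
    funext C
    congr 1
    refine List.filter_congr (fun S _ => ?_)
    simp [Function.comp_def, Bool.and_comm]

-- ===== VERDICT (by name: the statement is the Claim_ definition above) =====
theorem RCS_spec : Claim_equal_RCS := by
  intro af indenp p _ _
  exact RCS_eq_alt af indenp p
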